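-- pv_equiv track=rewrite | github.com/WeiLiToh/Hack-the-Interview-IV-Asia-Pacific- | arrangeStudents.py | arrangeStudents
-- ===== SOURCE A (Python) =====
-- def arrangeStudents(a, b):
--     test_case1 = []
--     test_case2 = []
--
--     students_heights = a + b
--
--     students_heights.sort()
--
--     zipped_heights1 = list(zip(a,b))
--     zipped_heights2 = list(zip(b,a))
--
--     for a,b in zipped_heights1:
--         test_case1.append(a)
--         test_case1.append(b)
--
--     for i,j in zipped_heights2:
--         test_case2.append(i)
--         test_case2.append(j)
--
--     if (test_case1 == students_heights) or (test_case2 == students_heights):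
--         return "YES"
--     else:
--         return "NO"
-- ===== SOURCE B (Python) =====
-- def _ok(x, y):
--     # one pass: checks prev <= u <= v along the interleaving x0,y0,x1,y1,...
--     prev = None
--     for u, v in zip(x, y):
--         if prev is not None and u < prev:
--             return False
--         if v < u:
--             return False
--         prev = v
--     return True
--
--
-- def arrangeStudents(a, b):
--     if len(a) != len(b):
--         return "NO"
--     return "YES" if _ok(a, b) or _ok(b, a) else "NO"
-- ===== Notes on version B (the rewrite author's own statement) =====
-- stated objective: faster
-- what changed: Instead of sorting a+b and materialising both interleavings for list comparison, B checks len(a)==len(b) and verifies in one linear pass (no sort, no intermediate lists) that an interleaving is non-decreasing, which characterises equality with the sorted merge.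
import Mathlib
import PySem

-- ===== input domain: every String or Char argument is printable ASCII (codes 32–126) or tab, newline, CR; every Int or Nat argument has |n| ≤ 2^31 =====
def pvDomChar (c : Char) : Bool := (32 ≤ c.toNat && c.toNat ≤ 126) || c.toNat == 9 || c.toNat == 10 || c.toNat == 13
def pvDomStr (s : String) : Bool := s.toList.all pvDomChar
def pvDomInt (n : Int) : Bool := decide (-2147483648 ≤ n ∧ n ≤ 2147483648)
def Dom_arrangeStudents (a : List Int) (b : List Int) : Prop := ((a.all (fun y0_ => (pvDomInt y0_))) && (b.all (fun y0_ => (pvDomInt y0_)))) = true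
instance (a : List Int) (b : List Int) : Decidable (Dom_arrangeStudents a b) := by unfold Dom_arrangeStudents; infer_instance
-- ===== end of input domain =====

-- B replaces A's sort-and-compare (O(n log n)) by a single linear pass checking that an
-- interleaving is non-decreasing; same return value everywhere, A and B are pure.

-- ===== PORT A =====
def arrangeStudents (a : List Int) (b : List Int) : String :=
  let students_heights := PySem.List.sorted (a ++ b) (fun x => x) false
  let zipped_heights1 := a.zip b
  let zipped_heights2 := b.zip a
  let test_case1 := zipped_heights1.foldl (fun acc p => (acc ++ [p.1]) ++ [p.2]) []
  let test_case2 := zipped_heights2.foldl (fun acc p => (acc ++ [p.1]) ++ [p.2]) []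
  if test_case1 = students_heights ∨ test_case2 = students_heights then "YES" else "NO"

-- ===== PORT B =====
-- B's helper _ok: one pass over zip(x,y), carrying the previous element of the interleaving
def pvOk : Option Int → List (Int × Int) → Bool
  | _, [] => true
  | prev, (u, v) :: rest =>
    if (match prev with | some p => decide (u < p) | none => false) then false
    else if v < u then false
    else pvOk (some v) rest

def arrangeStudents_alt (a : List Int) (b : List Int) : String :=
  if a.length ≠ b.length then "NO"
  else if pvOk none (a.zip b) || pvOk none (b.zip a) then "YES" else "NO"

-- ===== PRECONDITION & SPEC =====
def Spec_arrangeStudents (a : List Int) (b : List Int) (out : String) : Prop := out = arrangeStudents_alt a b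
instance (a : List Int) (b : List Int) (out : String) : Decidable (Spec_arrangeStudents a b out) := by unfold Spec_arrangeStudents; infer_instance

-- ===== CLAIM (what is proved, stated in full; the proofs are below) =====
def Claim_equal_arrangeStudents : Prop := ∀ (a : List Int) (b : List Int), Dom_arrangeStudents a b → Spec_arrangeStudents a b (arrangeStudents a b)

-- ===== LEMMAS AND PROOFS =====

-- interleaving of a zipped list, as a flatMap (the value A's append loops build)
def pvIntl (l : List (Int × Int)) : List Int := l.flatMap (fun p => [p.1, p.2])

theorem pvIntl_foldl (l : List (Int × Int)) :
    l.foldl (fun acc p => (acc ++ [p.1]) ++ [p.2]) [] = pvIntl l := by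
  have h : (fun (acc : List Int) (p : Int × Int) => (acc ++ [p.1]) ++ [p.2]) =
      (fun acc p => acc ++ [p.1, p.2]) := by
    funext acc p; simp
  rw [h, PySem.List.foldl_append_eq_flatMap (fun p => [p.1, p.2]) l []]; rfl

theorem pvIntl_cons (u v : Int) (rest : List (Int × Int)) :
    pvIntl ((u, v) :: rest) = u :: v :: pvIntl rest := by simp [pvIntl]

theorem pvIntl_length (l : List (Int × Int)) : (pvIntl l).length = 2 * l.length := by
  induction l with
  | nil => rfl
  | cons p rest ih => simp [pvIntl] at ih ⊢; omega

theorem pvIntl_perm : ∀ (a b : List Int), a.length = b.length →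
    (pvIntl (a.zip b)).Perm (a ++ b) := by
  intro a
  induction a with
  | nil => intro b h; cases b <;> simp_all [pvIntl]
  | cons x a' ih =>
    intro b h
    cases b with
    | nil => simp at h
    | cons y b' =>
      rw [List.zip_cons_cons, pvIntl_cons, List.cons_append]
      refine List.Perm.cons x ?_
      exact ((ih b' (by simpa using h)).cons y).trans List.perm_middle.symm

theorem pvOk_some : ∀ (l : List (Int × Int)) (p : Int),
    (pvOk (some p) l = true ↔ List.IsChain (· ≤ ·) (p :: pvIntl l)) := by
  intro l
  induction l with
  | nil => intro p; simp [pvOk, pvIntl]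
  | cons q rest ih =>
    intro p
    obtain ⟨u, v⟩ := q
    rw [pvIntl_cons, List.isChain_cons_cons, List.isChain_cons_cons]
    simp only [pvOk]
    split_ifs with h1 h2
    · simp only [false_iff]
      simp at h1
      rintro ⟨hpu, -⟩
      omega
    · simp only [false_iff]
      rintro ⟨-, huv, -⟩
      omega
    · rw [ih v]
      simp at h1
      constructor
      · intro hch; exact ⟨by omega, by omega, hch⟩
      · rintro ⟨-, -, hch⟩; exact hch

theorem pvOk_none (l : List (Int × Int)) :
    pvOk none l = true ↔ List.IsChain (· ≤ ·) (pvIntl l) := by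
  cases l with
  | nil => simp [pvOk, pvIntl]
  | cons q rest =>
    obtain ⟨u, v⟩ := q
    rw [pvIntl_cons, List.isChain_cons_cons]
    simp only [pvOk]
    rw [if_neg (by simp : ¬(false = true))]
    split_ifs with h
    · simp only [false_iff]
      rintro ⟨huv, -⟩
      omega
    · rw [pvOk_some rest v]
      constructor
      · intro hch; exact ⟨by omega, hch⟩
      · rintro ⟨-, hch⟩; exact hch

-- a permutation of s equals sorted(s) iff it is non-decreasing
theorem pv_eq_sorted_iff (t s : List Int) (hp : t.Perm s) :
    (t = PySem.List.sorted s (fun x => x) false) ↔ List.Pairwise (· ≤ ·) t := by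
  constructor
  · intro h; rw [h]; exact PySem.List.sorted_pairwise s (fun x => x)
  · intro h; exact (PySem.List.sorted_id_eq_of_perm_of_pairwise s t hp h).symm

theorem pv_pairwise_iff_ok (a b : List Int) (h : a.length = b.length) :
    (pvIntl (a.zip b) = PySem.List.sorted (a ++ b) (fun x => x) false) ↔
      pvOk none (a.zip b) = true := by
  rw [pv_eq_sorted_iff _ _ (pvIntl_perm a b h), pvOk_none]
  exact ⟨List.Pairwise.isChain, List.IsChain.pairwise⟩

-- ===== VERDICT (by name: the statement is the Claim_ definition above) =====
theorem arrangeStudents_spec : Claim_equal_arrangeStudents := by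
  intro a b _
  unfold Spec_arrangeStudents arrangeStudents arrangeStudents_alt
  simp only [pvIntl_foldl]
  by_cases h : a.length = b.length
  · have h1 := pv_pairwise_iff_ok a b h
    have h2 := pv_pairwise_iff_ok b a h.symm
    have hsort : PySem.List.sorted (b ++ a) (fun x => x) false
        = PySem.List.sorted (a ++ b) (fun x => x) false :=
      PySem.List.sorted_eq_sorted_of_perm _ _ _ (fun _ _ hxy => hxy) List.perm_append_comm
    rw [hsort] at h2
    have hiff : ((pvIntl (a.zip b) = PySem.List.sorted (a ++ b) (fun x => x) false) ∨
        (pvIntl (b.zip a) = PySem.List.sorted (a ++ b) (fun x => x) false)) ↔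
        (pvOk none (a.zip b) || pvOk none (b.zip a)) = true := by
      rw [h1, h2, Bool.or_eq_true]
    rw [if_congr hiff rfl rfl, if_neg (show ¬(a.length ≠ b.length) from by omega)]
  · have hA : ¬((pvIntl (a.zip b) = PySem.List.sorted (a ++ b) (fun x => x) false) ∨
        (pvIntl (b.zip a) = PySem.List.sorted (a ++ b) (fun x => x) false)) := by
      rintro (he | he) <;>
      · have hl := congrArg List.length he
        rw [pvIntl_length, PySem.List.length_sorted] at hl
        simp [List.length_zip, List.length_append] at hl
        omega
    rw [if_neg hA, if_pos (show a.length ≠ b.length from h)]
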